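-- pv_equiv track=rewrite | github.com/M1cleer/PythonLWs | LW1/1.3.py | is_palindrome_lat
-- ===== SOURCE A (Python) =====
-- def is_palindrome_lat(input_str):
--     uni_lat = list(range(97, 123))
--
--     lc_lat_chars = ""
--
--     for i in input_str:
--         if ord(i) in uni_lat:
--             lc_lat_chars += i
--
--     if lc_lat_chars == lc_lat_chars[::-1]:
--         return True
--
--     return False
-- ===== SOURCE B (Python) =====
-- def is_palindrome_lat(input_str):
--     lo = 0
--     hi = len(input_str) - 1
--     while lo < hi:
--         if not (97 <= ord(input_str[lo]) <= 122):
--             lo += 1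
--         elif not (97 <= ord(input_str[hi]) <= 122):
--             hi -= 1
--         elif input_str[lo] != input_str[hi]:
--             return False
--         else:
--             lo += 1
--             hi -= 1
--     return True
-- ===== Notes on version B (the rewrite author's own statement) =====
-- stated objective: alternative
-- what changed: Replaced building a filtered lowercase-letter string and comparing it with its reversed copy by an in-place two-pointer scan of the original string that skips non-letters from both ends and compares landed characters directly.
import Mathlib
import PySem

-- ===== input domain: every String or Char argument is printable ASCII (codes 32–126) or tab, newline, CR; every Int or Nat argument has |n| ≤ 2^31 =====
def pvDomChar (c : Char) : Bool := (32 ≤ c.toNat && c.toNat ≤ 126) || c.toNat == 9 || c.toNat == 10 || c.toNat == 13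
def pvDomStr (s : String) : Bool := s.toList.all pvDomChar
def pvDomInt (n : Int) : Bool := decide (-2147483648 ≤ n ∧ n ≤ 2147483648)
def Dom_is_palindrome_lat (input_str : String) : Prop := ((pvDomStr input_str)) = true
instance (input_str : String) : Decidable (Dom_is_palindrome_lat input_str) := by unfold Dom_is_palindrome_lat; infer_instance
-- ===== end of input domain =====

-- B replaces A's filter-then-compare-with-reversed-copy by a two-pointer scan of the
-- original string that skips non-letters from both ends (alternative algorithm, same cost).

-- ===== PORT A =====
-- A: build the filtered string of lowercase Latin letters, compare with its reverse.
def is_palindrome_lat (input_str : String) : Bool :=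
  let uni_lat : List Int := PySem.List.pyRange 97 123 1
  let lc_lat_chars : List Char :=
    input_str.toList.foldl
      (fun acc i => if uni_lat.contains ((i.toNat : Int)) then acc ++ [i] else acc) []
  if lc_lat_chars = lc_lat_chars.reverse then true else false

-- ===== PORT B =====
-- B's while loop; terminates because hi - lo strictly decreases
def pvGoB (l : List Char) (lo hi : Nat) : Bool :=
  if _h : lo < hi then
    if ¬ (97 ≤ (l.getD lo ' ').toNat ∧ (l.getD lo ' ').toNat ≤ 122) then
      pvGoB l (lo + 1) hi
    else if ¬ (97 ≤ (l.getD hi ' ').toNat ∧ (l.getD hi ' ').toNat ≤ 122) then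
      pvGoB l lo (hi - 1)
    else if l.getD lo ' ' ≠ l.getD hi ' ' then
      false
    else
      pvGoB l (lo + 1) (hi - 1)
  else
    true
termination_by hi - lo
decreasing_by all_goals omega

def is_palindrome_lat_alt (input_str : String) : Bool :=
  pvGoB input_str.toList 0 (input_str.toList.length - 1)

-- ===== PRECONDITION & SPEC =====
def Spec_is_palindrome_lat (input_str : String) (out : Bool) : Prop := out = is_palindrome_lat_alt input_str
instance (input_str : String) (out : Bool) : Decidable (Spec_is_palindrome_lat input_str out) := by unfold Spec_is_palindrome_lat; infer_instance

-- ===== CLAIM (what is proved, stated in full; the proofs are below) =====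
def Claim_equal_is_palindrome_lat : Prop := ∀ (input_str : String), Dom_is_palindrome_lat input_str → Spec_is_palindrome_lat input_str (is_palindrome_lat input_str)

-- ===== LEMMAS AND PROOFS =====

-- the letter predicate both programs test (ord in range(97,123))
def pvIsL (c : Char) : Bool := decide (97 ≤ c.toNat ∧ c.toNat ≤ 122)

-- A's accumulator loop is List.filter pvIsL
lemma pvA_foldl_filter (l acc : List Char) :
    l.foldl (fun acc i =>
        if (PySem.List.pyRange 97 123 1).contains ((i.toNat : Int)) then acc ++ [i] else acc) acc
      = acc ++ l.filter pvIsL := by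
  induction l generalizing acc with
  | nil => simp
  | cons c t ih =>
      have hmem : ((PySem.List.pyRange 97 123 1).contains ((c.toNat : Int))) = pvIsL c := by
        simp only [pvIsL]
        rw [Bool.eq_iff_iff, List.contains_iff_mem, PySem.List.mem_pyRange_one,
          decide_eq_true_iff]
        omega
      rw [List.foldl_cons, hmem, List.filter_cons]
      by_cases h : pvIsL c = true
      · rw [if_pos h, if_pos h, ih, List.append_assoc, List.singleton_append]
      · rw [if_neg h, if_neg h, ih]

-- the segment l[lo..hi] (inclusive)
def pvSeg (l : List Char) (lo hi : Nat) : List Char := (l.take (hi + 1)).drop lo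

lemma pvSeg_small (l : List Char) (lo hi : Nat) (h : hi ≤ lo) :
    (pvSeg l lo hi).length ≤ 1 := by
  simp only [pvSeg, List.length_drop, List.length_take]
  omega

lemma pvSeg_cons (l : List Char) (lo hi : Nat) (hlo : lo ≤ hi) (hhi : hi < l.length) :
    pvSeg l lo hi = l[lo]'(by omega) :: pvSeg l (lo + 1) hi := by
  unfold pvSeg
  rw [List.drop_eq_getElem_cons (by simp; omega)]
  simp

lemma pvSeg_concat (l : List Char) (lo hi : Nat) (hlo : lo ≤ hi) (h1 : 1 ≤ hi)
    (hhi : hi < l.length) :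
    pvSeg l lo hi = pvSeg l lo (hi - 1) ++ [l[hi]'hhi] := by
  unfold pvSeg
  rw [List.take_add_one]
  have hopt : l[hi]?.toList = [l[hi]'hhi] := by simp [List.getElem?_eq_getElem hhi]
  rw [hopt, List.drop_append_of_le_length (by simp; omega)]
  have h2 : hi - 1 + 1 = hi := by omega
  rw [h2]

lemma pvPal_small (m : List Char) (h : m.length ≤ 1) : m = m.reverse := by
  match m, h with
  | [], _ => rfl
  | [a], _ => rfl

lemma pvPal_sandwich (c d : Char) (m : List Char) :
    ((c :: (m ++ [d])) = (c :: (m ++ [d])).reverse) ↔ (c = d ∧ m = m.reverse) := by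
  have hrev : (c :: (m ++ [d])).reverse = d :: (m.reverse ++ [c]) := by simp
  rw [hrev]
  constructor
  · intro h
    injection h with h1 h2
    subst h1
    exact ⟨rfl, List.append_cancel_right h2⟩
  · rintro ⟨rfl, hm⟩
    rw [← hm]

-- main invariant: B's loop decides palindromicity of the filtered segment
lemma pvGoB_eq_aux (n : Nat) : ∀ (l : List Char) (lo hi : Nat), hi - lo ≤ n → hi < l.length →
    pvGoB l lo hi
      = decide ((pvSeg l lo hi).filter pvIsL = ((pvSeg l lo hi).filter pvIsL).reverse) := by
  induction n with
  | zero =>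
      intro l lo hi hn hhi
      have hle : hi ≤ lo := by omega
      rw [pvGoB]
      have hpal := pvPal_small ((pvSeg l lo hi).filter pvIsL)
        (le_trans (List.length_filter_le _ _) (pvSeg_small l lo hi hle))
      rw [dif_neg (Nat.not_lt.mpr hle)]
      exact (decide_eq_true hpal).symm
  | succ n ih =>
      intro l lo hi hn hhi
      by_cases hlt : lo < hi
      · have hlo_len : lo < l.length := by omega
        have hgdlo : l.getD lo ' ' = l[lo]'hlo_len := List.getD_eq_getElem l ' ' hlo_len
        have hgdhi : l.getD hi ' ' = l[hi]'hhi := List.getD_eq_getElem l ' ' hhi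
        rw [pvGoB]
        simp only [hlt, dif_pos, hgdlo, hgdhi]
        by_cases hL : 97 ≤ (l[lo]'hlo_len).toNat ∧ (l[lo]'hlo_len).toNat ≤ 122
        · by_cases hH : 97 ≤ (l[hi]'hhi).toNat ∧ (l[hi]'hhi).toNat ≤ 122
          · -- both ends are letters
            have hfl : pvIsL (l[lo]'hlo_len) = true := by
              simp only [pvIsL, decide_eq_true_iff]; exact hL
            have hfh : pvIsL (l[hi]'hhi) = true := by
              simp only [pvIsL, decide_eq_true_iff]; exact hH
            have hsing : List.filter pvIsL [l[hi]'hhi] = [l[hi]'hhi] := by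
              rw [List.filter_cons, if_pos hfh, List.filter_nil]
            have hseg : (pvSeg l lo hi).filter pvIsL
                = l[lo]'hlo_len :: ((pvSeg l (lo+1) (hi-1)).filter pvIsL ++ [l[hi]'hhi]) := by
              rw [pvSeg_cons l lo hi (by omega) hhi,
                pvSeg_concat l (lo+1) hi (by omega) (by omega) hhi,
                List.filter_cons, if_pos hfl, List.filter_append, hsing]
            rw [if_neg (not_not_intro hL), if_neg (not_not_intro hH)]
            by_cases heq : l[lo]'hlo_len = l[hi]'hhi
            · rw [if_neg (not_not_intro heq), ih l (lo+1) (hi-1) (by omega) (by omega),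
                hseg, decide_eq_decide, pvPal_sandwich]
              simp [heq]
            · rw [if_pos heq, hseg]
              have hnp : ¬ (l[lo]'hlo_len :: ((pvSeg l (lo+1) (hi-1)).filter pvIsL ++ [l[hi]'hhi])
                  = (l[lo]'hlo_len :: ((pvSeg l (lo+1) (hi-1)).filter pvIsL ++ [l[hi]'hhi])).reverse) := by
                rw [pvPal_sandwich]
                exact fun hc => heq hc.1
              exact (decide_eq_false hnp).symm
          · -- right end not a letter: move hi inward
            have hfh : pvIsL (l[hi]'hhi) = false := by
              simp only [pvIsL, decide_eq_false_iff_not]; exact hH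
            have hfilt : (pvSeg l lo hi).filter pvIsL = (pvSeg l lo (hi-1)).filter pvIsL := by
              rw [pvSeg_concat l lo hi (by omega) (by omega) hhi, List.filter_append,
                List.filter_cons, if_neg (by simp [hfh]), List.filter_nil, List.append_nil]
            rw [if_neg (not_not_intro hL), if_pos hH, ih l lo (hi-1) (by omega) (by omega), hfilt]
        · -- left end not a letter: move lo inward
          have hfl : pvIsL (l[lo]'hlo_len) = false := by
            simp only [pvIsL, decide_eq_false_iff_not]; exact hL
          have hfilt : (pvSeg l lo hi).filter pvIsL = (pvSeg l (lo+1) hi).filter pvIsL := by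
            rw [pvSeg_cons l lo hi (by omega) hhi, List.filter_cons, if_neg (by simp [hfl])]
          rw [if_pos hL, ih l (lo+1) hi (by omega) hhi, hfilt]
      · rw [pvGoB]
        have hpal := pvPal_small ((pvSeg l lo hi).filter pvIsL)
          (le_trans (List.length_filter_le _ _) (pvSeg_small l lo hi (by omega)))
        rw [dif_neg hlt]
        exact (decide_eq_true hpal).symm

theorem is_palindrome_lat_spec_aux (s : String) :
    is_palindrome_lat s = is_palindrome_lat_alt s := by
  have h1 : is_palindrome_lat s
      = (if s.toList.filter pvIsL = (s.toList.filter pvIsL).reverse then true else false) := by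
    have h0 : is_palindrome_lat s
        = (if (s.toList.foldl (fun acc i =>
              if (PySem.List.pyRange 97 123 1).contains ((i.toNat : Int)) then acc ++ [i] else acc)
              ([] : List Char))
            = (s.toList.foldl (fun acc i =>
              if (PySem.List.pyRange 97 123 1).contains ((i.toNat : Int)) then acc ++ [i] else acc)
              ([] : List Char)).reverse
           then true else false) := rfl
    rw [h0, pvA_foldl_filter, List.nil_append]
  rw [h1]
  unfold is_palindrome_lat_alt
  cases hl : s.toList with
  | nil => simp [pvGoB]
  | cons c t =>
      have hne : (c :: t).length - 1 < (c :: t).length := by simp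
      rw [pvGoB_eq_aux ((c :: t).length - 1) (c :: t) 0 ((c :: t).length - 1) le_rfl hne]
      have hseg : pvSeg (c :: t) 0 ((c :: t).length - 1) = c :: t := by
        unfold pvSeg
        simp
      rw [hseg]
      by_cases h : (c :: t).filter pvIsL = ((c :: t).filter pvIsL).reverse
      · rw [if_pos h]
        exact (decide_eq_true h).symm
      · rw [if_neg h]
        exact (decide_eq_false h).symm

-- ===== VERDICT (by name: the statement is the Claim_ definition above) =====
theorem is_palindrome_lat_spec : Claim_equal_is_palindrome_lat := by
  intro s _
  unfold Spec_is_palindrome_lat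
  exact is_palindrome_lat_spec_aux s
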